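-- pv_equiv track=rewrite | github.com/arkb75/SoloPilot | src/agents/email_intake/reviewer.py | _generate_red_flag_feedback
-- ===== SOURCE A (Python) =====
-- from typing import Dict, Any, Optional, List
--
-- def _generate_red_flag_feedback(response: str, red_flags: List[str]) -> str:
--     """Generate feedback for addressing red flags."""
--     flag_fixes = []
--
--     for flag in red_flags[:3]:  # Limit to top 3 red flags
--         if "over-promising" in flag.lower():
--             flag_fixes.append("Remove overpromises - be more realistic about timelines and outcomes")
--         elif "pricing" in flag.lower() or "cost" in flag.lower():
--             flag_fixes.append("Clarify pricing - provide ranges or ask about budget first")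
--         elif "technical" in flag.lower():
--             flag_fixes.append("Verify technical accuracy - ensure claims are realistic")
--         elif "scope" in flag.lower():
--             flag_fixes.append("Clarify project scope - be specific about what's included")
--         else:
--             flag_fixes.append(f"Address: {flag}")
--
--     if flag_fixes:
--         return f"RED FLAGS: {'; '.join(flag_fixes)}."
--
--     return ""
-- ===== SOURCE B (Python) =====
-- from typing import List
--
-- _KEYWORDS = [
--     ("over-promising", "Remove overpromises - be more realistic about timelines and outcomes"),
--     ("pricing", "Clarify pricing - provide ranges or ask about budget first"),
--     ("cost", "Clarify pricing - provide ranges or ask about budget first"),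
--     ("technical", "Verify technical accuracy - ensure claims are realistic"),
--     ("scope", "Clarify project scope - be specific about what's included"),
-- ]
--
--
-- def _generate_red_flag_feedback(response: str, red_flags: List[str]) -> str:
--     def body(flags, budget):
--         # builds the '; '-joined feedback directly, no list, no slice, no join
--         if budget == 0 or not flags:
--             return None
--         low = flags[0].lower()
--         msg = next((m for kw, m in _KEYWORDS if kw in low), "Address: " + flags[0])
--         rest = body(flags[1:], budget - 1)
--         return msg if rest is None else msg + "; " + rest
--
--     joined = body(red_flags, 3)
--     return "" if joined is None else "RED FLAGS: " + joined + "."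
-- ===== Notes on version B (the rewrite author's own statement) =====
-- stated objective: alternative
-- what changed: Recursive countdown over the flags that emits the '; '-joined feedback string directly back-to-front (no slice, no accumulator list, no join), with classification by first match in a flattened keyword->message pair list instead of the if/elif cascade.
import Mathlib
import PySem

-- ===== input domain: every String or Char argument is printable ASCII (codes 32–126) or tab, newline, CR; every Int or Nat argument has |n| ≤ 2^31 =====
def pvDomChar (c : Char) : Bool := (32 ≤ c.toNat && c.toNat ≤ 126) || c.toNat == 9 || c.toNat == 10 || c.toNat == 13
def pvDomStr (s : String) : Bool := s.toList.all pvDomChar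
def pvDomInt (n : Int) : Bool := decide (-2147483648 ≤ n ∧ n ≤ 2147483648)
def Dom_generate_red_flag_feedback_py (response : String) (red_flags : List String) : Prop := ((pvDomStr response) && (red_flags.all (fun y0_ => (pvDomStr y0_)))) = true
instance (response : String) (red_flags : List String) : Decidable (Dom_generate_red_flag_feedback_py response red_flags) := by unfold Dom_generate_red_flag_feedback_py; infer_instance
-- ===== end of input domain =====

-- B replaces A's slice/loop/list/join pipeline with a recursive countdown that emits the
-- '; '-joined feedback string directly, classifying each flag by first match in a
-- flattened keyword->message pair list; same return value, alternative structure.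
-- ===== PORT A =====
def generate_red_flag_feedback_py (response : String) (red_flags : List String) : String :=
  let flag_fixes : List String :=
    (PySem.List.slice red_flags none (some 3)).foldl (fun acc flag =>
      if PySem.Str.isIn "over-promising" (PySem.Str.lower flag) then
        acc ++ ["Remove overpromises - be more realistic about timelines and outcomes"]
      else if PySem.Str.isIn "pricing" (PySem.Str.lower flag) || PySem.Str.isIn "cost" (PySem.Str.lower flag) then
        acc ++ ["Clarify pricing - provide ranges or ask about budget first"]
      else if PySem.Str.isIn "technical" (PySem.Str.lower flag) then
        acc ++ ["Verify technical accuracy - ensure claims are realistic"]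
      else if PySem.Str.isIn "scope" (PySem.Str.lower flag) then
        acc ++ ["Clarify project scope - be specific about what's included"]
      else
        acc ++ ["Address: " ++ flag]) []
  if flag_fixes ≠ [] then "RED FLAGS: " ++ PySem.Str.join "; " flag_fixes ++ "." else ""

-- ===== PORT B =====
def pvKeywords : List (String × String) :=
  [ ("over-promising", "Remove overpromises - be more realistic about timelines and outcomes"),
    ("pricing", "Clarify pricing - provide ranges or ask about budget first"),
    ("cost", "Clarify pricing - provide ranges or ask about budget first"),
    ("technical", "Verify technical accuracy - ensure claims are realistic"),
    ("scope", "Clarify project scope - be specific about what's included") ]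

-- port of the next((m for kw, m in _KEYWORDS if kw in low), default) lookup
def pvNextMsg : List (String × String) → String → Option String
  | [], _ => none
  | (kw, m) :: rest, low =>
      if PySem.Str.isIn kw low then some m else pvNextMsg rest low

-- port of Source B's recursive `body`: builds the '; '-joined string directly
def pvBody : List String → Nat → Option String
  | _, 0 => none
  | [], _ + 1 => none
  | f :: rest, k + 1 =>
      let low := PySem.Str.lower f
      let msg := (pvNextMsg pvKeywords low).getD ("Address: " ++ f)
      match pvBody rest k with
      | none => some msg
      | some r => some (msg ++ "; " ++ r)

def generate_red_flag_feedback_py_alt (response : String) (red_flags : List String) : String :=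
  match pvBody red_flags 3 with
  | none => ""
  | some joined => "RED FLAGS: " ++ joined ++ "."

-- ===== PRECONDITION & SPEC =====
def Spec_generate_red_flag_feedback_py (response : String) (red_flags : List String) (out : String) : Prop := out = generate_red_flag_feedback_py_alt response red_flags
instance (response : String) (red_flags : List String) (out : String) : Decidable (Spec_generate_red_flag_feedback_py response red_flags out) := by unfold Spec_generate_red_flag_feedback_py; infer_instance

-- ===== CLAIM (what is proved, stated in full; the proofs are below) =====
def Claim_equal_generate_red_flag_feedback_py : Prop := ∀ (response : String) (red_flags : List String), Dom_generate_red_flag_feedback_py response red_flags → Spec_generate_red_flag_feedback_py response red_flags (generate_red_flag_feedback_py response red_flags)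

-- ===== LEMMAS AND PROOFS =====

def pvFix (f : String) : String :=
  (pvNextMsg pvKeywords (PySem.Str.lower f)).getD ("Address: " ++ f)

theorem pvFoldl_eq_map (xs : List String) (acc : List String) :
    xs.foldl (fun acc flag =>
      if PySem.Str.isIn "over-promising" (PySem.Str.lower flag) then
        acc ++ ["Remove overpromises - be more realistic about timelines and outcomes"]
      else if PySem.Str.isIn "pricing" (PySem.Str.lower flag) || PySem.Str.isIn "cost" (PySem.Str.lower flag) then
        acc ++ ["Clarify pricing - provide ranges or ask about budget first"]
      else if PySem.Str.isIn "technical" (PySem.Str.lower flag) then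
        acc ++ ["Verify technical accuracy - ensure claims are realistic"]
      else if PySem.Str.isIn "scope" (PySem.Str.lower flag) then
        acc ++ ["Clarify project scope - be specific about what's included"]
      else
        acc ++ ["Address: " ++ flag]) acc = acc ++ xs.map pvFix := by
  induction xs generalizing acc with
  | nil => simp
  | cons f rest ih =>
    simp only [List.foldl_cons, List.map_cons, ih]
    have hstep : (if PySem.Str.isIn "over-promising" (PySem.Str.lower f) then
        acc ++ ["Remove overpromises - be more realistic about timelines and outcomes"]
      else if PySem.Str.isIn "pricing" (PySem.Str.lower f) || PySem.Str.isIn "cost" (PySem.Str.lower f) then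
        acc ++ ["Clarify pricing - provide ranges or ask about budget first"]
      else if PySem.Str.isIn "technical" (PySem.Str.lower f) then
        acc ++ ["Verify technical accuracy - ensure claims are realistic"]
      else if PySem.Str.isIn "scope" (PySem.Str.lower f) then
        acc ++ ["Clarify project scope - be specific about what's included"]
      else
        acc ++ ["Address: " ++ f]) = acc ++ [pvFix f] := by
      simp only [pvFix, pvKeywords, pvNextMsg, Bool.or_eq_true]
      split_ifs <;> simp_all
    rw [hstep]; simp

theorem pvJoin_cons_cons (x y : String) (t : List String) :
    PySem.Str.join "; " (x :: y :: t) = x ++ "; " ++ PySem.Str.join "; " (y :: t) := by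
  have h : ("; " : String) = String.ofList [';', ' '] := rfl
  simp only [PySem.Str.join, List.map_cons, PySem.Chars.join_cons_cons]
  rw [String.ofList_append, String.ofList_append, String.ofList_toList, h]
  simp

theorem pvBody_eq_join (flags : List String) (k : Nat) :
    pvBody flags k =
      match flags.take k with
      | [] => none
      | l => some (PySem.Str.join "; " (l.map pvFix)) := by
  induction flags generalizing k with
  | nil => cases k <;> rfl
  | cons f rest ih =>
    cases k with
    | zero => rfl
    | succ k =>
      simp only [pvBody, List.take_succ_cons, List.map_cons, ih]
      cases h : rest.take k with
      | nil => simp [PySem.Str.join, PySem.Chars.join_singleton, pvFix]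
      | cons y t => simp [pvJoin_cons_cons, pvFix]

-- ===== VERDICT (by name: the statement is the Claim_ definition above) =====
theorem generate_red_flag_feedback_py_spec : Claim_equal_generate_red_flag_feedback_py := by
  intro response red_flags _
  show generate_red_flag_feedback_py response red_flags = generate_red_flag_feedback_py_alt response red_flags
  have hs : PySem.List.slice red_flags none (some 3) = red_flags.take 3 := by
    simp [pysem]
  simp only [generate_red_flag_feedback_py, generate_red_flag_feedback_py_alt,
    hs, pvFoldl_eq_map, List.nil_append, pvBody_eq_join]
  cases h : red_flags.take 3 with
  | nil => simp
  | cons y t => simp
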